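-- pv_equiv track=rewrite | github.com/clive19850929/pokepocketsim | bootstrap_initial_models.py | trim_entries_after_canonical_terminal
-- ===== SOURCE A (Python) =====
-- from typing import Any, Dict, Iterable, List, Optional, Tuple
--
-- def trim_entries_after_canonical_terminal(entries: List[Dict]) -> List[Dict]:
--     """終局後のダミー行が混じるケースの簡易トリム（'done'/ 'terminal' / 'is_terminal' を見る）"""
--     out = []
--     seen_terminal = False
--     for e in entries:
--         term = bool(e.get("done") or e.get("terminal") or e.get("is_terminal"))
--         if not seen_terminal:
--             out.append(e)
--             if term:
--                 seen_terminal = True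
--         else:
--             pass
--     return out
-- ===== SOURCE B (Python) =====
-- from typing import Dict, List
--
-- def trim_entries_after_canonical_terminal(entries: List[Dict]) -> List[Dict]:
--     idx = next((i for i, e in enumerate(entries)
--                 if bool(e.get("done") or e.get("terminal") or e.get("is_terminal"))), None)
--     if idx is None:
--         return entries[:]
--     return entries[:idx + 1]
-- ===== Notes on version B (the rewrite author's own statement) =====
-- stated objective: simpler
-- what changed: Replaces the flag-carrying append loop with find-the-first-terminal-index then one slice (entries[:idx+1], or a copy when no terminal row exists).
import Mathlib
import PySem

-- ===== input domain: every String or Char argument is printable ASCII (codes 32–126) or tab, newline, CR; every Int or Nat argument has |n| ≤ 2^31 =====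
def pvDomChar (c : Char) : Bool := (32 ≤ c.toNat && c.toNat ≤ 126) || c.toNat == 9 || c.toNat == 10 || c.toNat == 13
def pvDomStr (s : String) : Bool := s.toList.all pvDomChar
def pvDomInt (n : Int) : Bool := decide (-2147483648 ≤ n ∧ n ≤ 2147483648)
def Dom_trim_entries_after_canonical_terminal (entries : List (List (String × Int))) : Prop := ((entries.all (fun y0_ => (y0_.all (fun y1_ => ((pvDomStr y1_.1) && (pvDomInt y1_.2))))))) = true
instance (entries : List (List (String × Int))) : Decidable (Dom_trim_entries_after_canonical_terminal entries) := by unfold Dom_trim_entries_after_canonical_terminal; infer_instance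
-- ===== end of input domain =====

-- B replaces A's flag-carrying append loop by locating the first terminal row's index and slicing once (simpler decomposition).


-- ===== PORT A =====
-- bool(e.get(k)): a missing key is None (falsy), an int value is truthy iff nonzero
def pvTruthy (o : Option Int) : Bool :=
  match o with
  | some v => decide (v ≠ 0)
  | none => false

-- term = bool(e.get("done") or e.get("terminal") or e.get("is_terminal"))
def pvTerm (e : List (String × Int)) : Bool :=
  pvTruthy ((PySem.Dict.mk e).get? "done") || pvTruthy ((PySem.Dict.mk e).get? "terminal") ||
    pvTruthy ((PySem.Dict.mk e).get? "is_terminal")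

-- one iteration of A's loop over the state (out, seen_terminal)
def pvStepA (st : List (List (String × Int)) × Bool) (e : List (String × Int)) :
    List (List (String × Int)) × Bool :=
  let term := pvTerm e
  if !st.2 then (st.1 ++ [e], if term then true else st.2) else st

-- A: loop appending to `out` while `seen_terminal` is false
def trim_entries_after_canonical_terminal (entries : List (List (String × Int))) : List (List (String × Int)) :=
  (entries.foldl pvStepA ([], false)).1

-- ===== PORT B =====
-- B: find the first terminal row's index, then slice (whole copy if none)
def trim_entries_after_canonical_terminal_alt (entries : List (List (String × Int))) : List (List (String × Int)) :=
  match entries.findIdx? (fun e => pvTerm e) with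
  | some i => entries.take (i + 1)
  | none => entries

-- ===== PRECONDITION & SPEC =====
def Spec_trim_entries_after_canonical_terminal (entries : List (List (String × Int))) (out : List (List (String × Int))) : Prop := out = trim_entries_after_canonical_terminal_alt entries
instance (entries : List (List (String × Int))) (out : List (List (String × Int))) : Decidable (Spec_trim_entries_after_canonical_terminal entries out) := by unfold Spec_trim_entries_after_canonical_terminal; infer_instance

-- ===== CLAIM (what is proved, stated in full; the proofs are below) =====
def Claim_equal_trim_entries_after_canonical_terminal : Prop := ∀ (entries : List (List (String × Int))), Dom_trim_entries_after_canonical_terminal entries → Spec_trim_entries_after_canonical_terminal entries (trim_entries_after_canonical_terminal entries)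

-- ===== LEMMAS AND PROOFS =====
-- once seen_terminal is true, A's loop changes nothing
theorem pv_foldl_true (l : List (List (String × Int))) (acc : List (List (String × Int))) :
    l.foldl pvStepA (acc, true) = (acc, true) := by
  induction l with
  | nil => rfl
  | cons e t ih => simpa [pvStepA] using ih

-- A's loop from (acc, false) produces acc ++ (B's result on the remaining list)
theorem pv_foldl_false (l : List (List (String × Int))) (acc : List (List (String × Int))) :
    (l.foldl pvStepA (acc, false)).1 = acc ++ trim_entries_after_canonical_terminal_alt l := by
  induction l generalizing acc with
  | nil => simp [trim_entries_after_canonical_terminal_alt]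
  | cons e t ih =>
    rw [List.foldl_cons]
    by_cases h : pvTerm e = true
    · have hs : pvStepA (acc, false) e = (acc ++ [e], true) := by simp [pvStepA, h]
      rw [hs, pv_foldl_true]
      simp [trim_entries_after_canonical_terminal_alt, List.findIdx?_cons, h]
    · have hs : pvStepA (acc, false) e = (acc ++ [e], false) := by simp [pvStepA, h]
      rw [hs, ih]
      simp only [trim_entries_after_canonical_terminal_alt, List.findIdx?_cons, h, if_false,
        Bool.false_eq_true]
      cases hf : t.findIdx? (fun e => pvTerm e) <;> simp [List.append_assoc]

-- ===== VERDICT (by name: the statement is the Claim_ definition above) =====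
theorem trim_entries_after_canonical_terminal_spec : Claim_equal_trim_entries_after_canonical_terminal := by
  intro entries _
  unfold Spec_trim_entries_after_canonical_terminal trim_entries_after_canonical_terminal
  simpa using pv_foldl_false entries []
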